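-- pv_equiv track=rewrite | github.com/Serena-Fang/CS334-Machine-Learning-homeworks-Python | HW2-Decision-Tree/dt.py | majorityCount
-- ===== SOURCE A (Python) =====
-- import operator
--
-- def majorityCount(yList):
--     counter = {}
--     for y in yList:
--         if y not in counter.keys():
--             counter[y] = 0
--         counter[y] += 1
--     Counter = sorted(counter.items(), key = operator.itemgetter(1), reverse=True)
--     label = Counter[0][0]
--     return label
-- ===== SOURCE B (Python) =====
-- def majorityCount(yList):
--     best = yList[0]
--     best_count = yList.count(best)
--     for y in yList:
--         c = yList.count(y)
--         if c > best_count: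
--             best, best_count = y, c
--     return best
-- ===== Notes on version B (the rewrite author's own statement) =====
-- stated objective: simpler
-- what changed: Replaces the frequency dict plus stable descending sort with a single strict-greater running-best scan using list.count, keeping the earliest-appearance tie-break.
import Mathlib
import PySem

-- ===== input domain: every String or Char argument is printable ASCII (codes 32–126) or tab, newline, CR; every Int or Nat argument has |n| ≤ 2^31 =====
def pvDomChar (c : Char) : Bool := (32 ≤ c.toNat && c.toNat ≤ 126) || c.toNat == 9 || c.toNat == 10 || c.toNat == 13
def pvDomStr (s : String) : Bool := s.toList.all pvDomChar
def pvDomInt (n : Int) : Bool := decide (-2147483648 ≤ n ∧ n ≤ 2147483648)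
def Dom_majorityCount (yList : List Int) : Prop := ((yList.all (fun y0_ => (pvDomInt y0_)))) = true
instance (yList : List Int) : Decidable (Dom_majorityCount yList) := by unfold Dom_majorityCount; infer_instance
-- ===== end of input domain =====

-- B replaces A's frequency dict + stable descending sort by a single running-best scan
-- with strict-greater updates (objective: simpler); same value everywhere both return.

-- ===== PORT A =====
def majorityCount (yList : List Int) : Int :=
  -- counter = {}; for y in yList: if y not in counter.keys(): counter[y] = 0; counter[y] += 1
  let counter : PySem.Dict Int Int :=
    yList.foldl (fun d y =>
      (if d.contains y then d else d.insert y 0).insert y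
        ((if d.contains y then d else d.insert y 0).getD y 0 + 1)) PySem.Dict.empty
  -- Counter = sorted(counter.items(), key=itemgetter(1), reverse=True)
  let CounterL := PySem.List.sorted counter.items (fun p => p.2) true
  -- label = Counter[0][0]  (IndexError on empty input; excluded by Pre_)
  match PySem.List.pyGet? CounterL 0 with
  | some p => p.1
  | none => 0

-- ===== PORT B =====
def majorityCount_alt (yList : List Int) : Int :=
  match yList with
  | [] => 0  -- yList[0] raises IndexError in Python; excluded by Pre_
  | y0 :: _ =>
    -- best = yList[0]; best_count = yList.count(best)
    -- for y in yList: c = yList.count(y); if c > best_count: best, best_count = y, c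
    (yList.foldl (fun st y =>
        let c := PySem.List.count yList y
        if st.2 < c then (y, c) else st)
      (y0, PySem.List.count yList y0)).1

-- ===== PRECONDITION & SPEC =====
-- Pre_ excludes only the empty list, on which both A and B raise IndexError.
def Pre_majorityCount (yList : List Int) : Prop := yList ≠ []
instance (yList : List Int) : Decidable (Pre_majorityCount yList) := by
  unfold Pre_majorityCount; infer_instance
def pvWitness_majorityCount : List Int := [1, 2, 2]

def Spec_majorityCount (yList : List Int) (out : Int) : Prop := out = majorityCount_alt yList
instance (yList : List Int) (out : Int) : Decidable (Spec_majorityCount yList out) := by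
  unfold Spec_majorityCount; infer_instance

-- ===== CLAIM (what is proved, stated in full; the proofs are below) =====
def Claim_equal_majorityCount : Prop :=
  ∀ (yList : List Int), Dom_majorityCount yList → Pre_majorityCount yList →
    Spec_majorityCount yList (majorityCount yList)

-- ===== LEMMAS AND PROOFS =====

-- A's dict-building step is exactly Counter's modify step.
theorem pvStepA (d : PySem.Dict Int Int) (y : Int) :
    (if d.contains y then d else d.insert y 0).insert y
      ((if d.contains y then d else d.insert y 0).getD y 0 + 1) = d.modify y 0 (· + 1) := by
  by_cases h : d.contains y = true
  · simp [h, PySem.Dict.modify]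
  · have hall : ∀ p ∈ d.items, (p.1 == y) = false := by
      intro p hp
      by_contra hne
      exact h (List.any_eq_true.mpr ⟨p, hp, by simpa using hne⟩)
    have hfind : d.items.find? (fun p => p.1 == y) = none :=
      List.find?_eq_none.mpr (fun p hp => by simp [hall p hp])
    have hins0 : d.insert y 0 = PySem.Dict.mk (d.items ++ [(y, 0)]) := by
      unfold PySem.Dict.insert
      rw [if_neg h]
    have hget0 : d.getD y 0 = 0 := by
      simp [PySem.Dict.getD, PySem.Dict.get?, hfind]
    have hgetD1 : (PySem.Dict.mk (d.items ++ [(y, 0)])).getD y 0 = 0 := by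
      simp [PySem.Dict.getD, PySem.Dict.get?, List.find?_append, hfind]
    rw [if_neg h, hins0, hgetD1, PySem.Dict.modify, hget0]
    have hc : (PySem.Dict.mk (d.items ++ [(y, (0 : Int))])).contains y = true := by
      simp [PySem.Dict.contains]
    have hmap : List.map (fun p => if (p.1 == y) = true then (y, (0 : Int) + 1) else p) d.items
        = List.map id d.items :=
      List.map_congr_left (fun p hp => by simp [hall p hp])
    have hL : (PySem.Dict.mk (d.items ++ [(y, (0 : Int))])).insert y ((0 : Int) + 1)
        = PySem.Dict.mk (d.items ++ [(y, (0 : Int) + 1)]) := by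
      simp only [PySem.Dict.insert, hc, if_true, List.map_append]
      rw [hmap, List.map_id]
      simp
    have hR : d.insert y ((0 : Int) + 1) = PySem.Dict.mk (d.items ++ [(y, (0 : Int) + 1)]) := by
      unfold PySem.Dict.insert
      rw [if_neg h]
    rw [hL, hR]

theorem pvPyGetZero {α : Type} (x : α) (l : List α) :
    PySem.List.pyGet? (x :: l) 0 = some x := by
  simp [PySem.List.pyGet?, PySem.List.pyIdx?]

-- head of Python's stable reverse sort = running first-max with strict improvement
theorem pvFoldlInsertByHead {α : Type} (key : α → Int) (l : List α) :
    ∀ (b : α) (t : List α),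
      (l.foldl (fun acc x =>
          PySem.List.insertBy (fun a c => decide (key c < key a)) x acc) (b :: t)).head? =
        some (l.foldl (fun m y => if key m < key y then y else m) b) := by
  induction l with
  | nil => intro b t; simp
  | cons x l ih =>
    intro b t
    simp only [List.foldl_cons, PySem.List.insertBy]
    by_cases hk : key b < key x
    · simpa [hk] using ih x (b :: t)
    · simpa [hk] using ih b (PySem.List.insertBy (fun a c => decide (key c < key a)) x t)

theorem pvSortedRevHead {α : Type} (key : α → Int) (p : α) (rest : List α) :
    (PySem.List.sorted (p :: rest) key true).head? =
      some (rest.foldl (fun m y => if key m < key y then y else m) p) := by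
  simp only [PySem.List.sorted, if_true, List.foldl_cons]
  have h0 : PySem.List.insertBy (fun a c => decide (key c < key a)) p [] = [p] := rfl
  rw [h0]
  exact pvFoldlInsertByHead key rest p []

-- the new (not yet seen) elements of a list, in order of first appearance
def pvNews (seen : List Int) : List Int → List Int
  | [] => []
  | y :: t => if y ∈ seen then pvNews seen t else y :: pvNews (seen ++ [y]) t

theorem pvOfListAux (t : List Int) : ∀ (seen : List Int),
    List.foldl PySem.Set.add seen t = seen ++ pvNews seen t := by
  induction t with
  | nil => intro seen; simp [pvNews]
  | cons y t ih =>
    intro seen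
    by_cases hy : y ∈ seen
    · simp [pvNews, hy, PySem.Set.add, ih]
    · simp [pvNews, hy, PySem.Set.add, ih (seen ++ [y])]

-- collapsing the (key, key-count) pairs of A's fold to the key component
theorem pvPairFoldA (c : Int → Nat) (l : List Int) : ∀ (b : Int),
    (l.foldl (fun (p : Int × Int) k =>
        if p.2 < ((c k : Nat) : Int) then (k, ((c k : Nat) : Int)) else p)
        (b, ((c b : Nat) : Int))).1
      = l.foldl (fun m k => if c m < c k then k else m) b := by
  induction l with
  | nil => intro b; rfl
  | cons k l ih =>
    intro b
    by_cases h : c b < c k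
    · simpa [h, Int.ofNat_lt.mpr h] using ih k
    · have h' : ¬ (((c b : Nat) : Int) < ((c k : Nat) : Int)) := by exact_mod_cast h
      simpa [h, h'] using ih b

-- collapsing B's (best, best_count) pair to the best component
theorem pvPairFoldB (c : Int → Nat) (l : List Int) : ∀ (b : Int),
    (l.foldl (fun (st : Int × Nat) y =>
        let cc := c y
        if st.2 < cc then (y, cc) else st) (b, c b)).1
      = l.foldl (fun m k => if c m < c k then k else m) b := by
  induction l with
  | nil => intro b; rfl
  | cons k l ih =>
    intro b
    by_cases h : c b < c k
    · simpa [h] using ih k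
    · simpa [h] using ih b

-- duplicates already dominated by the running best can be dropped from the scan
theorem pvDropDups (c : Int → Nat) (t : List Int) : ∀ (seen : List Int) (b : Int),
    (∀ z ∈ seen, c z ≤ c b) →
    t.foldl (fun m k => if c m < c k then k else m) b
      = (pvNews seen t).foldl (fun m k => if c m < c k then k else m) b := by
  induction t with
  | nil => intro seen b _; rfl
  | cons y t ih =>
    intro seen b hinv
    by_cases hy : y ∈ seen
    · have hnb : ¬ c b < c y := not_lt.mpr (hinv y hy)
      simp only [pvNews, hy, if_true, List.foldl_cons, hnb, if_false]
      exact ih seen b hinv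
    · simp only [pvNews, hy, if_false, List.foldl_cons]
      apply ih (seen ++ [y])
      intro z hz
      rcases List.mem_append.mp hz with hz | hz
      · by_cases hb : c b < c y
        · simp only [hb, if_true]; exact le_of_lt (lt_of_le_of_lt (hinv z hz) hb)
        · simp only [hb, if_false]; exact hinv z hz
      · have hzy : z = y := by simpa using hz
        subst hzy
        by_cases hb : c b < c z
        · simp [hb]
        · simp only [hb, if_false]; exact not_lt.mp hb

-- ===== VERDICT (by name: the statement is the Claim_ definition above) =====
theorem majorityCount_spec : Claim_equal_majorityCount := by
  intro yList _ hpre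
  unfold Spec_majorityCount
  obtain ⟨y0, t, rfl⟩ : ∃ y0 t, yList = y0 :: t := by
    cases yList with
    | nil => exact absurd rfl hpre
    | cons a b => exact ⟨a, b, rfl⟩
  have hset : PySem.Set.ofList (y0 :: t) = y0 :: pvNews [y0] t := by
    have h1 : PySem.Set.ofList (y0 :: t) = List.foldl PySem.Set.add [y0] t := by
      simp [PySem.Set.ofList, PySem.Set.add, PySem.Set.empty]
    rw [h1, pvOfListAux t [y0]]
    rfl
  -- B's value: the running-best scan over the tail
  have hB : majorityCount_alt (y0 :: t)
      = (y0 :: t).foldl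
          (fun m k => if List.count m (y0 :: t) < List.count k (y0 :: t) then k else m) y0 :=
    pvPairFoldB (fun v => List.count v (y0 :: t)) (y0 :: t) y0
  rw [List.foldl_cons, if_neg (lt_irrefl _)] at hB
  -- A's value
  simp only [majorityCount, pvStepA, ← PySem.Dict.counter_eq_foldl,
    PySem.Dict.items_counter, hset, List.map_cons]
  cases hs : PySem.List.sorted
      ((y0, ((List.count y0 (y0 :: t) : Nat) : Int))
        :: (pvNews [y0] t).map (fun k => (k, ((List.count k (y0 :: t) : Nat) : Int))))
      (fun p => p.2) true with
  | nil =>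
    exact absurd ((PySem.List.sorted_eq_nil_iff _ _ _).mp hs) (by simp)
  | cons m rest =>
    have hhead := pvSortedRevHead (fun p : Int × Int => p.2)
      (y0, ((List.count y0 (y0 :: t) : Nat) : Int))
      ((pvNews [y0] t).map (fun k => (k, ((List.count k (y0 :: t) : Nat) : Int))))
    rw [hs] at hhead
    have hm : m = ((pvNews [y0] t).map
        (fun k => (k, ((List.count k (y0 :: t) : Nat) : Int)))).foldl
        (fun p q => if p.2 < q.2 then q else p)
        (y0, ((List.count y0 (y0 :: t) : Nat) : Int)) := by
      simpa using hhead
    have hA : m.1 = (pvNews [y0] t).foldl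
        (fun m k => if List.count m (y0 :: t) < List.count k (y0 :: t) then k else m) y0 := by
      rw [hm, List.foldl_map]
      exact pvPairFoldA (fun v => List.count v (y0 :: t)) (pvNews [y0] t) y0
    rw [pvPyGetZero]
    show m.1 = majorityCount_alt (y0 :: t)
    rw [hA, hB]
    exact (pvDropDups (fun v => List.count v (y0 :: t)) t [y0] y0
      (fun z hz => by
        have hzy : z = y0 := List.mem_singleton.mp hz
        subst hzy
        exact Nat.le_refl _)).symm
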